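-- pv_equiv track=rewrite | github.com/jianershi/algorithm | 946.faster.py | build_transformation_matrix
-- ===== SOURCE A (Python) =====
-- def build_transformation_matrix(n):
--     matrix = [[0] * (n + 2) for _ in range(n + 2)]
--
--     for i in range(n + 1):
--         matrix[i][0] = 10
--     for j in range(1, n + 1):
--         matrix[0][j] = 0
--     for j in range(1, n + 1):
--         matrix[n + 1][j] = 0
--     for i in range(n + 2):
--         matrix[i][n + 1] = 1
--     for i in range(1, n + 1):
--         for c in range(1, i + 1):
--             matrix[i][c] = 1
--
--     return matrix
-- ===== SOURCE B (Python) =====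
-- def build_transformation_matrix(n):
--     N = n + 2
--
--     def col(j):
--         if j == N - 1:
--             return [1] * N
--         if j == 0:
--             return [10] * (N - 1) + [0]
--         return [0] * j + [1] * (N - 1 - j) + [0]
--
--     return [list(row) for row in zip(*[col(j) for j in range(N)])]
-- ===== Notes on version B (the rewrite author's own statement) =====
-- stated objective: alternative
-- what changed: Replaces zero-initialization plus five overwriting band-fill passes with a column-wise construction: each column is built once from its closed form and the matrix is obtained by transposing the column list with zip(*cols).
import Mathlib
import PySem

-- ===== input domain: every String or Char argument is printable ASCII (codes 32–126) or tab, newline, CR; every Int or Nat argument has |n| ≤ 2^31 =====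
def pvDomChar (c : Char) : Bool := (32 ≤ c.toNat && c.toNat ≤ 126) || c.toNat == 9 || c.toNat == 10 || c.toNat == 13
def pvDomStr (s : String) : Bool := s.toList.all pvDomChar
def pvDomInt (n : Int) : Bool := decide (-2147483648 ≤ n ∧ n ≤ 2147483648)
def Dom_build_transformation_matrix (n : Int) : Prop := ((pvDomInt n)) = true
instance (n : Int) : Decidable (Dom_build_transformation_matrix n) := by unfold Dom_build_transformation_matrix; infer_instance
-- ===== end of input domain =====

-- B builds the matrix column-wise (each column once, from its closed form) and transposes
-- with zip(*cols), instead of A's zero-init plus five overwriting band loops (objective: alternative).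

-- ===== PORT A =====
-- matrix[i][j] = v  (every index in A is nonnegative whenever its loop body runs, so .toNat is exact)
def pvSet2 (m : List (List Int)) (i j : Nat) (v : Int) : List (List Int) :=
  m.set i ((m.getD i []).set j v)

def build_transformation_matrix (n : Int) : List (List Int) :=
  let matrix := (PySem.List.pyRange 0 (n+2) 1).map (fun _ => List.replicate (n+2).toNat 0)
  let matrix := (PySem.List.pyRange 0 (n+1) 1).foldl (fun m i => pvSet2 m i.toNat 0 10) matrix
  let matrix := (PySem.List.pyRange 1 (n+1) 1).foldl (fun m j => pvSet2 m 0 j.toNat 0) matrix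
  let matrix := (PySem.List.pyRange 1 (n+1) 1).foldl (fun m j => pvSet2 m (n+1).toNat j.toNat 0) matrix
  let matrix := (PySem.List.pyRange 0 (n+2) 1).foldl (fun m i => pvSet2 m i.toNat (n+1).toNat 1) matrix
  let matrix := (PySem.List.pyRange 1 (n+1) 1).foldl (fun m i =>
    (PySem.List.pyRange 1 (i+1) 1).foldl (fun m2 c => pvSet2 m2 i.toNat c.toNat 1) m) matrix
  matrix

-- ===== PORT B =====
-- the column builder 'col(j)' of Source B ([x]*k counts are nonnegative on the branch taken, so .toNat is exact)
def pvCol (n j : Int) : List Int :=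
  if j = (n+2) - 1 then List.replicate (n+2).toNat (1:Int)
  else if j = 0 then List.replicate ((n+2) - 1).toNat (10:Int) ++ [0]
  else List.replicate j.toNat (0:Int) ++ List.replicate ((n+2) - 1 - j).toNat 1 ++ [0]

-- Python zip(*cols): take one element from the head of every column while all are nonempty.
-- Fuel = length of the first column bounds the number of steps exactly (zip stops at the shortest).
def pvZipAux : Nat → List (List Int) → List (List Int)
  | 0, _ => []
  | fuel+1, cols =>
      if cols.all (fun c => !c.isEmpty) then
        cols.map (fun c => c.headD 0) :: pvZipAux fuel (cols.map List.tail)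
      else []

def pvZipStar (cols : List (List Int)) : List (List Int) :=
  match cols with
  | [] => []
  | c :: cs => pvZipAux c.length (c :: cs)

def build_transformation_matrix_alt (n : Int) : List (List Int) :=
  pvZipStar ((PySem.List.pyRange 0 (n+2) 1).map (fun j => pvCol n j))

-- ===== PRECONDITION & SPEC =====
def Spec_build_transformation_matrix (n : Int) (out : List (List Int)) : Prop := out = build_transformation_matrix_alt n
instance (n : Int) (out : List (List Int)) : Decidable (Spec_build_transformation_matrix n out) := by unfold Spec_build_transformation_matrix; infer_instance

-- ===== CLAIM (what is proved, stated in full; the proofs are below) =====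
def Claim_equal_build_transformation_matrix : Prop := ∀ (n : Int), Dom_build_transformation_matrix n → Spec_build_transformation_matrix n (build_transformation_matrix n)

-- ===== LEMMAS AND PROOFS =====

-- an N×N matrix given by a function on its (Nat) coordinates
def pvOfFun (N : Nat) (f : Nat → Nat → Int) : List (List Int) :=
  (List.range N).map (fun i => (List.range N).map (f i))

theorem pvOfFun_congr (N : Nat) (f g : Nat → Nat → Int)
    (h : ∀ a < N, ∀ b < N, f a b = g a b) : pvOfFun N f = pvOfFun N g := by
  unfold pvOfFun
  apply List.ext_getElem <;> simp
  intro a ha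
  exact fun b hb => h a ha b hb

theorem pvSet2_ofFun (N : Nat) (f : Nat → Nat → Int) (i j : Nat) (v : Int)
    (hi : i < N) (hj : j < N) :
    pvSet2 (pvOfFun N f) i j v
      = pvOfFun N (fun a b => if a = i ∧ b = j then v else f a b) := by
  unfold pvSet2 pvOfFun
  have hget : ((List.range N).map (fun i => (List.range N).map (f i))).getD i []
      = (List.range N).map (f i) := by
    simp [List.getD_eq_getElem?_getD, hi]
  rw [hget]
  apply List.ext_getElem
  · simp
  intro a h1 h2
  simp only [List.length_set, List.length_map, List.length_range] at h1
  by_cases hai : a = i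
  · subst hai
    simp
    apply List.ext_getElem
    · simp
    intro b hb1 hb2
    simp only [List.length_set, List.length_map, List.length_range] at hb1
    simp [List.getElem_set, List.getElem_map]
    by_cases hbj : b = j
    · subst hbj; simp
    · simp [hbj]
      intro h; exact (hbj h.symm).elim
  · simp [Ne.symm hai, hai]

-- one band-filling pass: a fold of constant writes over a list of positions
theorem pvPass {α : Type} (N : Nat) (l : List α) (pos : α → Nat × Nat) (v : Int)
    (f : Nat → Nat → Int)
    (h : ∀ x ∈ l, (pos x).1 < N ∧ (pos x).2 < N) :
    l.foldl (fun m x => pvSet2 m (pos x).1 (pos x).2 v) (pvOfFun N f)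
      = pvOfFun N (fun a b => if (a, b) ∈ l.map pos then v else f a b) := by
  induction l generalizing f with
  | nil => simp
  | cons x xs ih =>
    simp only [List.foldl_cons]
    rw [pvSet2_ofFun N f (pos x).1 (pos x).2 v (h x (by simp)).1 (h x (by simp)).2]
    rw [ih _ (fun y hy => h y (List.mem_cons_of_mem _ hy))]
    apply pvOfFun_congr
    intro a ha b hb
    simp only [List.map_cons, List.mem_cons, Prod.ext_iff]
    by_cases h1 : (a,b) ∈ xs.map pos <;> by_cases h2 : a = (pos x).1 ∧ b = (pos x).2 <;>
      simp [h1, h2]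

-- the nested bottom-triangle pass, as one pass over the flattened position list
theorem pvPassNested (N : Nat) (l : List Int) (f : Nat → Nat → Int)
    (h : ∀ p ∈ l.flatMap (fun i => (PySem.List.pyRange 1 (i+1) 1).map
            (fun (c : Int) => (i.toNat, c.toNat))), p.1 < N ∧ p.2 < N) :
    l.foldl (fun m i => (PySem.List.pyRange 1 (i+1) 1).foldl
        (fun m2 c => pvSet2 m2 i.toNat c.toNat 1) m) (pvOfFun N f)
      = pvOfFun N (fun a b => if (a, b) ∈ l.flatMap (fun i =>
            (PySem.List.pyRange 1 (i+1) 1).map (fun (c : Int) => (i.toNat, c.toNat)))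
          then 1 else f a b) := by
  induction l generalizing f with
  | nil => simp
  | cons x xs ih =>
    simp only [List.foldl_cons]
    rw [show (PySem.List.pyRange 1 (x+1) 1).foldl
          (fun m2 c => pvSet2 m2 x.toNat c.toNat 1) (pvOfFun N f)
        = pvOfFun N (fun a b => if (a, b) ∈ (PySem.List.pyRange 1 (x+1) 1).map
              (fun c => (x.toNat, c.toNat)) then 1 else f a b)
      from pvPass N _ (fun c => (x.toNat, c.toNat)) 1 f
        (fun (c : Int) hc => h (x.toNat, c.toNat)
          (by simp only [List.flatMap_cons, List.mem_append]
              exact Or.inl (List.mem_map_of_mem hc)))]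
    rw [ih _ (fun p hp => h p (by
          simp only [List.flatMap_cons, List.mem_append]
          exact Or.inr hp))]
    apply pvOfFun_congr
    intro a ha b hb
    simp only [List.flatMap_cons, List.mem_append]
    by_cases h1 : (a,b) ∈ xs.flatMap (fun i => (PySem.List.pyRange 1 (i+1) 1).map
        (fun (c : Int) => (i.toNat, c.toNat))) <;>
      by_cases h2 : (a,b) ∈ (PySem.List.pyRange 1 (x+1) 1).map (fun c => (x.toNat, c.toNat)) <;>
      simp [h1, h2]

-- zip(*cols) on a nonempty list of equal-length columns is the index-wise transpose
theorem pvZipAux_eq (m : Nat) : ∀ cols : List (List Int), cols ≠ [] →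
    (∀ c ∈ cols, c.length = m) →
    pvZipAux m cols = (List.range m).map (fun i => cols.map (fun c => c.getD i 0)) := by
  induction m with
  | zero => intro cols _ _; simp [pvZipAux]
  | succ m ih =>
    intro cols hne hlen
    have hall : cols.all (fun c => !c.isEmpty) = true := by
      rw [List.all_eq_true]
      intro c hc
      have h := hlen c hc
      rcases c with _ | ⟨x, t⟩
      · simp at h
      · simp
    rw [pvZipAux, if_pos hall]
    rw [ih (cols.map List.tail) (by simpa using hne)
        (by intro c hc
            rw [List.mem_map] at hc
            obtain ⟨c', hc', rfl⟩ := hc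
            have h := hlen c' hc'
            rcases c' with _ | ⟨x, t⟩
            · simp at h
            · simpa using h)]
    rw [List.range_succ_eq_map]
    simp only [List.map_cons, List.map_map]
    refine congrArg₂ List.cons ?_ ?_
    · apply List.map_congr_left
      intro c hc
      have h := hlen c hc
      rcases c with _ | ⟨x, t⟩
      · simp at h
      · simp
    · apply List.map_congr_left
      intro i _
      simp only [Function.comp_apply]
      apply List.map_congr_left
      intro c hc
      have h := hlen c hc
      rcases c with _ | ⟨x, t⟩
      · simp at h
      · simp

-- the three column shapes of B, described cell-wise
theorem pvCol_last (n : Int) :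
    List.replicate (n+2).toNat (1:Int)
      = (List.range (n+2).toNat).map (fun (_ : Nat) => (1:Int)) := by
  simp [List.map_const']

theorem pvCol_first (n : Int) (hn : 0 ≤ n) :
    List.replicate (n+1).toNat (10:Int) ++ [0]
      = (List.range (n+2).toNat).map (fun (a : Nat) => if (a:Int) < n+1 then 10 else 0) := by
  apply List.ext_getElem
  · simp; omega
  intro a h1 h2
  simp only [List.length_append, List.length_replicate, List.length_cons, List.length_nil] at h1
  simp only [List.getElem_map, List.getElem_range]
  by_cases ha : a < (n+1).toNat
  · rw [List.getElem_append_left (by simpa using ha)]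
    simp [List.getElem_replicate]
    omega
  · rw [List.getElem_append_right (by simpa using ha)]
    simp
    omega

theorem pvCol_mid (n j : Int) (h1 : 1 ≤ j) (hj : j ≤ n) :
    List.replicate j.toNat (0:Int) ++ List.replicate (n+1-j).toNat 1 ++ [0]
      = (List.range (n+2).toNat).map (fun (a : Nat) =>
          if (a:Int) < j then 0 else if (a:Int) < n+1 then 1 else 0) := by
  apply List.ext_getElem
  · simp; omega
  intro a ha1 ha2
  simp only [List.length_append, List.length_replicate, List.length_cons, List.length_nil] at ha1
  simp only [List.getElem_map, List.getElem_range]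
  simp only [List.getElem_append, List.length_append, List.length_replicate,
    List.getElem_replicate]
  split_ifs <;> simp_all <;> omega

-- every column of B has length n+2 (for -1 ≤ n, 0 ≤ j < n+2)
theorem pvCol_length (n j : Int) (hn : -1 ≤ n) (h0 : 0 ≤ j) (hj : j < n+2) :
    (pvCol n j).length = (n+2).toNat := by
  unfold pvCol
  split_ifs <;> simp <;> omega

-- getD of a map over range, inside bounds
theorem pvGetD_map_range (N : Nat) (f : Nat → Int) (i : Nat) (hi : i < N) :
    ((List.range N).map f).getD i 0 = f i := by
  simp [List.getD_eq_getElem?_getD, hi]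

-- ===== VERDICT (by name: the statement is the Claim_ definition above) =====
theorem build_transformation_matrix_spec : Claim_equal_build_transformation_matrix := by
  intro n _
  unfold Spec_build_transformation_matrix
  by_cases hn : -1 ≤ n
  · -- N×N case, N = (n+2).toNat ≥ 1
    have h0 : (PySem.List.pyRange 0 (n+2) 1).map (fun _ => List.replicate (n+2).toNat 0)
        = pvOfFun (n+2).toNat (fun _ _ => 0) := by
      unfold pvOfFun
      rw [PySem.List.pyRange_one]
      simp [List.map_map, Function.comp_def, List.map_const']
    have e1 : (PySem.List.pyRange 0 (n+1) 1).foldl (fun m i => pvSet2 m i.toNat 0 10)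
          (pvOfFun (n+2).toNat (fun _ _ => 0))
        = pvOfFun (n+2).toNat (fun a b =>
            if (a,b) ∈ (PySem.List.pyRange 0 (n+1) 1).map (fun (i : Int) => (i.toNat, 0)) then 10
            else 0) :=
      pvPass _ _ (fun (i : Int) => (i.toNat, 0)) 10 _ (by
        intro x hx
        rw [PySem.List.mem_pyRange_one] at hx
        change x.toNat < (n+2).toNat ∧ 0 < (n+2).toNat
        omega)
    have e2 : (PySem.List.pyRange 1 (n+1) 1).foldl (fun m j => pvSet2 m 0 j.toNat 0)
          (pvOfFun (n+2).toNat (fun a b =>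
            if (a,b) ∈ (PySem.List.pyRange 0 (n+1) 1).map (fun (i : Int) => (i.toNat, 0)) then 10
            else 0))
        = pvOfFun (n+2).toNat (fun a b =>
            if (a,b) ∈ (PySem.List.pyRange 1 (n+1) 1).map (fun (j : Int) => (0, j.toNat)) then 0
            else if (a,b) ∈ (PySem.List.pyRange 0 (n+1) 1).map (fun (i : Int) => (i.toNat, 0)) then 10
            else 0) :=
      pvPass _ _ (fun (j : Int) => (0, j.toNat)) 0 _ (by
        intro x hx
        rw [PySem.List.mem_pyRange_one] at hx
        change 0 < (n+2).toNat ∧ x.toNat < (n+2).toNat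
        omega)
    have e3 : (PySem.List.pyRange 1 (n+1) 1).foldl (fun m j => pvSet2 m (n+1).toNat j.toNat 0)
          (pvOfFun (n+2).toNat (fun a b =>
            if (a,b) ∈ (PySem.List.pyRange 1 (n+1) 1).map (fun (j : Int) => (0, j.toNat)) then 0
            else if (a,b) ∈ (PySem.List.pyRange 0 (n+1) 1).map (fun (i : Int) => (i.toNat, 0)) then 10
            else 0))
        = pvOfFun (n+2).toNat (fun a b =>
            if (a,b) ∈ (PySem.List.pyRange 1 (n+1) 1).map (fun (j : Int) => ((n+1).toNat, j.toNat)) then 0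
            else if (a,b) ∈ (PySem.List.pyRange 1 (n+1) 1).map (fun (j : Int) => (0, j.toNat)) then 0
            else if (a,b) ∈ (PySem.List.pyRange 0 (n+1) 1).map (fun (i : Int) => (i.toNat, 0)) then 10
            else 0) :=
      pvPass _ _ (fun (j : Int) => ((n+1).toNat, j.toNat)) 0 _ (by
        intro x hx
        rw [PySem.List.mem_pyRange_one] at hx
        change (n+1).toNat < (n+2).toNat ∧ x.toNat < (n+2).toNat
        omega)
    have e4 : (PySem.List.pyRange 0 (n+2) 1).foldl (fun m i => pvSet2 m i.toNat (n+1).toNat 1)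
          (pvOfFun (n+2).toNat (fun a b =>
            if (a,b) ∈ (PySem.List.pyRange 1 (n+1) 1).map (fun (j : Int) => ((n+1).toNat, j.toNat)) then 0
            else if (a,b) ∈ (PySem.List.pyRange 1 (n+1) 1).map (fun (j : Int) => (0, j.toNat)) then 0
            else if (a,b) ∈ (PySem.List.pyRange 0 (n+1) 1).map (fun (i : Int) => (i.toNat, 0)) then 10
            else 0))
        = pvOfFun (n+2).toNat (fun a b =>
            if (a,b) ∈ (PySem.List.pyRange 0 (n+2) 1).map (fun (i : Int) => (i.toNat, (n+1).toNat)) then 1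
            else if (a,b) ∈ (PySem.List.pyRange 1 (n+1) 1).map (fun (j : Int) => ((n+1).toNat, j.toNat)) then 0
            else if (a,b) ∈ (PySem.List.pyRange 1 (n+1) 1).map (fun (j : Int) => (0, j.toNat)) then 0
            else if (a,b) ∈ (PySem.List.pyRange 0 (n+1) 1).map (fun (i : Int) => (i.toNat, 0)) then 10
            else 0) :=
      pvPass _ _ (fun (i : Int) => (i.toNat, (n+1).toNat)) 1 _ (by
        intro x hx
        rw [PySem.List.mem_pyRange_one] at hx
        change x.toNat < (n+2).toNat ∧ (n+1).toNat < (n+2).toNat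
        omega)
    have e5 := pvPassNested (n+2).toNat (PySem.List.pyRange 1 (n+1) 1)
        (fun a b =>
            if (a,b) ∈ (PySem.List.pyRange 0 (n+2) 1).map (fun (i : Int) => (i.toNat, (n+1).toNat)) then 1
            else if (a,b) ∈ (PySem.List.pyRange 1 (n+1) 1).map (fun (j : Int) => ((n+1).toNat, j.toNat)) then 0
            else if (a,b) ∈ (PySem.List.pyRange 1 (n+1) 1).map (fun (j : Int) => (0, j.toNat)) then 0
            else if (a,b) ∈ (PySem.List.pyRange 0 (n+1) 1).map (fun (i : Int) => (i.toNat, 0)) then 10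
            else 0)
        (by
          intro p hp
          simp only [List.mem_flatMap, List.mem_map, PySem.List.mem_pyRange_one] at hp
          obtain ⟨i, ⟨hi1, hi2⟩, c, ⟨hc1, hc2⟩, hpe⟩ := hp
          subst hpe
          change i.toNat < (n+2).toNat ∧ c.toNat < (n+2).toNat
          omega)
    -- B as a cell-wise matrix
    have hcols : (PySem.List.pyRange 0 (n+2) 1).map (fun j => pvCol n j)
        = (List.range (n+2).toNat).map (fun (j : Nat) => pvCol n (j:Int)) := by
      rw [PySem.List.pyRange_one]
      rw [List.map_map]
      rw [show ((n+2:Int) - 0).toNat = (n+2).toNat by norm_num]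
      apply List.map_congr_left
      intro j _
      simp
    have hNpos : 0 < (n+2).toNat := by omega
    have hcell : ∀ j : Nat, j < (n+2).toNat →
        pvCol n (j:Int) = (List.range (n+2).toNat).map (fun (a : Nat) =>
          if (j:Int) = n+1 then 1
          else if j = 0 then (if (a:Int) < n+1 then 10 else 0)
          else if (a:Int) < (j:Int) then 0 else if (a:Int) < n+1 then 1 else 0) := by
      intro j hj
      by_cases hjl : (j:Int) = n+1
      · rw [show pvCol n (j:Int) = List.replicate (n+2).toNat (1:Int) by
            unfold pvCol; rw [if_pos (by omega)]]
        rw [pvCol_last n]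
        apply List.map_congr_left
        intro a _
        rw [if_pos hjl]
      · by_cases hj0 : j = 0
        · subst hj0
          have hn0 : 0 ≤ n := by omega
          rw [show pvCol n ((0:Nat):Int) = List.replicate (n+1).toNat (10:Int) ++ [0] by
              unfold pvCol
              rw [if_neg (by omega), if_pos (by norm_num),
                show (n:Int)+2-1 = n+1 from by ring]]
          rw [pvCol_first n hn0]
          apply List.map_congr_left
          intro a _
          rw [if_neg hjl, if_pos rfl]
        · rw [show pvCol n (j:Int)
              = List.replicate (j:Int).toNat (0:Int) ++ List.replicate (n+1-(j:Int)).toNat 1 ++ [0] by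
              unfold pvCol
              rw [if_neg (by omega), if_neg (by omega),
                show (n:Int)+2-1-(j:Int) = n+1-(j:Int) from by ring]]
          rw [pvCol_mid n (j:Int) (by omega) (by omega)]
          apply List.map_congr_left
          intro a _
          rw [if_neg hjl, if_neg hj0]
    have halt : build_transformation_matrix_alt n
        = pvOfFun (n+2).toNat (fun a b =>
            if (b:Int) = n+1 then 1
            else if b = 0 then (if (a:Int) < n+1 then 10 else 0)
            else if (a:Int) < (b:Int) then 0 else if (a:Int) < n+1 then 1 else 0) := by
      unfold build_transformation_matrix_alt
      rw [hcols]
      obtain ⟨N', hN'⟩ : ∃ N', (n+2).toNat = N' + 1 := ⟨(n+2).toNat - 1, by omega⟩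
      have hne : (List.range (n+2).toNat).map (fun (j : Nat) => pvCol n (j:Int)) ≠ [] := by
        simp; omega
      have hlen : ∀ c ∈ (List.range (n+2).toNat).map (fun (j : Nat) => pvCol n (j:Int)),
          c.length = (n+2).toNat := by
        intro c hc
        rw [List.mem_map] at hc
        obtain ⟨j, hj, rfl⟩ := hc
        rw [List.mem_range] at hj
        exact pvCol_length n (j:Int) hn (by omega) (by omega)
      have hzip : pvZipStar ((List.range (n+2).toNat).map (fun (j : Nat) => pvCol n (j:Int)))
          = pvZipAux (n+2).toNat ((List.range (n+2).toNat).map (fun (j : Nat) => pvCol n (j:Int))) := by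
        rcases hc : (List.range (n+2).toNat).map (fun (j : Nat) => pvCol n (j:Int)) with _ | ⟨c, cs⟩
        · exact absurd hc hne
        · rw [pvZipStar]
          congr 1
          have : c ∈ (List.range (n+2).toNat).map (fun (j : Nat) => pvCol n (j:Int)) := by
            rw [hc]; exact List.mem_cons_self
          exact hlen c this
      rw [hzip, pvZipAux_eq (n+2).toNat _ hne hlen]
      unfold pvOfFun
      apply List.map_congr_left
      intro a ha
      rw [List.mem_range] at ha
      rw [List.map_map]
      apply List.ext_getElem
      · simp
      intro b hb1 hb2
      simp only [List.length_map, List.length_range] at hb1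
      simp only [List.getElem_map, List.getElem_range, Function.comp_apply]
      rw [hcell b hb1, pvGetD_map_range _ _ a ha]
    simp only [build_transformation_matrix]
    rw [h0, e1, e2, e3, e4, e5, halt]
    apply pvOfFun_congr
    intro a ha b hb
    have c1 : ((a,b) ∈ (PySem.List.pyRange 0 (n+1) 1).map (fun (i : Int) => (i.toNat, (0:Nat))))
        ↔ ((a:Int) < n+1 ∧ b = 0) := by
      simp only [List.mem_map, PySem.List.mem_pyRange_one, Prod.mk.injEq]
      constructor
      · rintro ⟨x, ⟨h1, h2⟩, h3, h4⟩; omega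
      · rintro ⟨h1, h2⟩; exact ⟨(a:Int), ⟨by omega, by omega⟩, by omega, by omega⟩
    have c2 : ((a,b) ∈ (PySem.List.pyRange 1 (n+1) 1).map (fun (j : Int) => ((0:Nat), j.toNat)))
        ↔ (a = 0 ∧ 1 ≤ (b:Int) ∧ (b:Int) < n+1) := by
      simp only [List.mem_map, PySem.List.mem_pyRange_one, Prod.mk.injEq]
      constructor
      · rintro ⟨x, ⟨h1, h2⟩, h3, h4⟩; omega
      · rintro ⟨h1, h2, h3⟩; exact ⟨(b:Int), ⟨by omega, by omega⟩, by omega, by omega⟩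
    have c3 : ((a,b) ∈ (PySem.List.pyRange 1 (n+1) 1).map (fun (j : Int) => ((n+1).toNat, j.toNat)))
        ↔ ((a:Int) = n+1 ∧ 1 ≤ (b:Int) ∧ (b:Int) < n+1) := by
      simp only [List.mem_map, PySem.List.mem_pyRange_one, Prod.mk.injEq]
      constructor
      · rintro ⟨x, ⟨h1, h2⟩, h3, h4⟩; omega
      · rintro ⟨h1, h2, h3⟩; exact ⟨(b:Int), ⟨by omega, by omega⟩, by omega, by omega⟩
    have c4 : ((a,b) ∈ (PySem.List.pyRange 0 (n+2) 1).map (fun (i : Int) => (i.toNat, (n+1).toNat)))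
        ↔ ((a:Int) < n+2 ∧ (b:Int) = n+1) := by
      simp only [List.mem_map, PySem.List.mem_pyRange_one, Prod.mk.injEq]
      constructor
      · rintro ⟨x, ⟨h1, h2⟩, h3, h4⟩; omega
      · rintro ⟨h1, h2⟩; exact ⟨(a:Int), ⟨by omega, by omega⟩, by omega, by omega⟩
    have c5 : ((a,b) ∈ (PySem.List.pyRange 1 (n+1) 1).flatMap (fun i =>
            (PySem.List.pyRange 1 (i+1) 1).map (fun (c : Int) => (i.toNat, c.toNat))))
        ↔ (1 ≤ (a:Int) ∧ (a:Int) ≤ n ∧ 1 ≤ (b:Int) ∧ (b:Int) ≤ (a:Int)) := by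
      simp only [List.mem_flatMap, List.mem_map, PySem.List.mem_pyRange_one, Prod.mk.injEq]
      constructor
      · rintro ⟨i, ⟨h1, h2⟩, x, ⟨h3, h4⟩, h5, h6⟩; omega
      · rintro ⟨h1, h2, h3, h4⟩
        exact ⟨(a:Int), ⟨by omega, by omega⟩, (b:Int), ⟨by omega, by omega⟩, by omega, by omega⟩
    simp only [c1, c2, c3, c4, c5]
    split_ifs <;> omega
  · -- n ≤ -2: every range is empty, both matrices are []
    simp [build_transformation_matrix, build_transformation_matrix_alt, pvZipStar,
      PySem.List.pyRange_one_eq_nil (show n+2 ≤ 0 by omega),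
      PySem.List.pyRange_one_eq_nil (show n+1 ≤ 0 by omega),
      PySem.List.pyRange_one_eq_nil (show n+1 ≤ 1 by omega)]
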